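-- pv_equiv track=rewrite | github.com/throb-goblin/Australian-Taxation-Law-Library | Legislation/sample_quality_review.py | _max_consecutive_blank_lines
-- ===== SOURCE A (Python) =====
-- def _max_consecutive_blank_lines(text: str) -> int:
--     max_run = 0
--     cur = 0
--     for line in text.splitlines():
--         if line.strip() == "":
--             cur += 1
--             if cur > max_run:
--                 max_run = cur
--         else:
--             cur = 0
--     return max_run
-- ===== SOURCE B (Python) =====
-- def _max_consecutive_blank_lines(text: str) -> int:
--     flags = "".join("b" if line.strip() == "" else "x" for line in text.splitlines())
--     return max((len(run) for run in flags.split("x")), default=0)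
-- ===== Notes on version B (the rewrite author's own statement) =====
-- stated objective: idiomatic
-- what changed: Replaced the running-counter-with-reset over lines by a group-then-reduce pass: map each line to a blank/non-blank flag character, split the flag string on the non-blank marker so each piece is one maximal blank run, and return the max run length with default 0.
import Mathlib
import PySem

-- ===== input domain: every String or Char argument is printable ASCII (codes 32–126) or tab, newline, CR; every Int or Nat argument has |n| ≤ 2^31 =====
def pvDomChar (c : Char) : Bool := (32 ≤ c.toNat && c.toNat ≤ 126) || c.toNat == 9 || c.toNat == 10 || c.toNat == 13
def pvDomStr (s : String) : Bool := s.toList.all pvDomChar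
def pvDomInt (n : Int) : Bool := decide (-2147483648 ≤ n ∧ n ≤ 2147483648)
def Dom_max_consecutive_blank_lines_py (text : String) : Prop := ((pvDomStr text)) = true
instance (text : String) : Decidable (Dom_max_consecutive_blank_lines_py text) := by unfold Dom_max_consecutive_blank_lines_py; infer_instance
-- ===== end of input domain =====

-- B replaces A's running counter with a group-then-reduce pass (flag string, split on the
-- non-blank marker, max run length with default 0); same result, idiomatic decomposition.

-- ===== PORT A =====
def max_consecutive_blank_lines_py (text : String) : Int :=
  ((PySem.Str.splitlines text).foldl
    (fun (st : Int × Int) line =>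
      if PySem.Str.strip line = "" then
        let cur := st.2 + 1
        if cur > st.1 then (cur, cur) else (st.1, cur)
      else (st.1, 0))
    (0, 0)).1

-- ===== PORT B =====
-- '"".join(one single-char piece per line)' is ported as the List Char of those characters.
def max_consecutive_blank_lines_py_alt (text : String) : Int :=
  PySem.List.maxD
    ((PySem.Chars.splitOn
        ((PySem.Str.splitlines text).map
          (fun line => if PySem.Str.strip line = "" then 'b' else 'x'))
        ['x']).map (fun run => PySem.List.len run))
    (fun x => x) 0

-- ===== PRECONDITION & SPEC =====
def Spec_max_consecutive_blank_lines_py (text : String) (out : Int) : Prop := out = max_consecutive_blank_lines_py_alt text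
instance (text : String) (out : Int) : Decidable (Spec_max_consecutive_blank_lines_py text out) := by unfold Spec_max_consecutive_blank_lines_py; infer_instance

-- ===== CLAIM (what is proved, stated in full; the proofs are below) =====
def Claim_equal_max_consecutive_blank_lines_py : Prop := ∀ (text : String), Dom_max_consecutive_blank_lines_py text → Spec_max_consecutive_blank_lines_py text (max_consecutive_blank_lines_py text)

-- ===== LEMMAS AND PROOFS =====

-- the maximal runs of characters between 'x' markers (what flags.split("x") produces)
def runsX : List Char → List (List Char)
  | [] => [[]]
  | c :: rest =>
    if c = 'x' then [] :: runsX rest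
    else match runsX rest with
      | [] => [[c]]
      | h :: t => (c :: h) :: t

lemma runsX_cons_exists (cs : List Char) : ∃ h t, runsX cs = h :: t := by
  cases cs with
  | nil => exact ⟨[], [], rfl⟩
  | cons c rest =>
    by_cases hc : c = 'x'
    · exact ⟨[], runsX rest, by simp [runsX, hc]⟩
    · rcases hh : runsX rest with _ | ⟨h, t⟩
      · exact ⟨[c], [], by simp [runsX, hc, hh]⟩
      · exact ⟨c :: h, t, by simp [runsX, hc, hh]⟩

lemma go_succ_cons (c : Char) (rest cur : List Char) (acc : List (List Char)) (f : Nat) :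
    PySem.Chars.splitOn.go ['x'] (f + 1) (c :: rest) cur acc
      = (if List.isPrefixOf ['x'] (c :: rest) = true
         then PySem.Chars.splitOn.go ['x'] f (List.drop ['x'].length (c :: rest)) [] (cur.reverse :: acc)
         else PySem.Chars.splitOn.go ['x'] f rest (c :: cur) acc) := rfl

lemma go_spec (cs : List Char) : ∀ (cur : List Char) (acc : List (List Char)) (fuel : Nat),
    cs.length ≤ fuel →
    PySem.Chars.splitOn.go ['x'] fuel cs cur acc
      = acc.reverse ++ (runsX cs).modifyHead (fun h => cur.reverse ++ h) := by
  induction cs with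
  | nil =>
    intro cur acc fuel _
    cases fuel <;> simp [PySem.Chars.splitOn.go, runsX]
  | cons c rest ih =>
    intro cur acc fuel hfuel
    cases fuel with
    | zero => simp at hfuel
    | succ f =>
      rw [go_succ_cons]
      by_cases hc : c = 'x'
      · subst hc
        rw [if_pos (show List.isPrefixOf ['x'] ('x' :: rest) = true by
              simp [List.isPrefixOf])]
        show PySem.Chars.splitOn.go ['x'] f rest [] (cur.reverse :: acc) = _
        rw [ih [] (cur.reverse :: acc) f (by simp at hfuel; omega)]
        rcases runsX_cons_exists rest with ⟨h, t, hh⟩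
        simp [runsX, hh]
      · rw [if_neg (show ¬ (List.isPrefixOf ['x'] (c :: rest) = true) by
              simp [List.isPrefixOf]; intro h; exact hc h.symm)]
        rw [ih (c :: cur) acc f (by simp at hfuel; omega)]
        rcases runsX_cons_exists rest with ⟨h, t, hh⟩
        simp [runsX, hc, hh]

lemma splitOn_eq_runsX (cs : List Char) : PySem.Chars.splitOn cs ['x'] = runsX cs := by
  unfold PySem.Chars.splitOn
  rw [go_spec cs [] [] (cs.length + 1) (by omega)]
  rcases runsX_cons_exists cs with ⟨h, t, hh⟩
  simp [hh]

lemma foldl_max_max (l : List Int) : ∀ a b : Int, l.foldl max (max a b) = max a (l.foldl max b) := by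
  induction l with
  | nil => intro a b; simp
  | cons x xs ih =>
    intro a b
    simp only [List.foldl_cons]
    rw [max_assoc, ih]

-- Python's first-maximal fold over a nonempty Int list is the plain max fold
lemma max?_int_cons (a : Int) (xs : List Int) :
    PySem.List.max? (a :: xs) (fun x => x) = some (xs.foldl max a) := by
  unfold PySem.List.max?
  simp only [List.foldl_cons]
  induction xs generalizing a with
  | nil => rfl
  | cons x rest ih =>
    simp only [List.foldl_cons]
    rw [show (if a < x then some x else some a) = some (max a x) by
          split_ifs with h
          · rw [max_eq_right h.le]
          · rw [max_eq_left (not_lt.1 h)]]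
    exact ih (max a x)

-- A's loop over flag characters computes the max over the blank-run lengths
lemma loop_spec (cs : List Char) (hcs : ∀ ch ∈ cs, ch = 'b' ∨ ch = 'x') :
    ∀ m c : Int, 0 ≤ c → c ≤ m →
    (cs.foldl (fun (st : Int × Int) ch =>
        if ch = 'b' then
          if st.2 + 1 > st.1 then (st.2 + 1, st.2 + 1) else (st.1, st.2 + 1)
        else (st.1, 0)) (m, c)).1
      = max m (((runsX cs).tail.map (fun r => (r.length : Int))).foldl max
          (c + ((runsX cs).headI.length : Int))) := by
  induction cs with
  | nil =>
    intro m c _ hcm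
    simp [runsX]; omega
  | cons ch rest ih =>
    intro m c hc hcm
    have hrest : ∀ x ∈ rest, x = 'b' ∨ x = 'x' := fun x hx => hcs x (List.mem_cons_of_mem _ hx)
    rcases runsX_cons_exists rest with ⟨h, t, hh⟩
    rcases hcs ch (List.mem_cons_self) with hb | hx
    · subst hb
      have hruns : runsX ('b' :: rest) = ('b' :: h) :: t := by simp [runsX, hh]
      rw [hruns]
      simp only [List.tail_cons, List.headI_cons, List.foldl_cons, if_true]
      have harith : c + ((('b' :: h).length : Int)) = c + 1 + (h.length : Int) := by
        push_cast [List.length_cons]; ring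
      rw [harith]
      have key : ∀ m' : Int, c + 1 ≤ m' →
          (rest.foldl (fun (st : Int × Int) ch =>
            if ch = 'b' then
              if st.2 + 1 > st.1 then (st.2 + 1, st.2 + 1) else (st.1, st.2 + 1)
            else (st.1, 0)) (m', c + 1)).1
          = max m' ((t.map (fun r => (r.length : Int))).foldl max
              (c + 1 + (h.length : Int))) := by
        intro m' h1
        rw [ih hrest m' (c + 1) (by omega) h1, hh]
        simp only [List.tail_cons, List.headI_cons]
      by_cases hgt : c + 1 > m
      · rw [if_pos hgt, key (c + 1) (le_refl _)]
        have hbase := (PySem.List.le_foldl_max (t.map (fun r => (r.length : Int)))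
          (c + 1 + (h.length : Int))).1
        omega
      · rw [if_neg hgt, key m (by omega)]
    · subst hx
      simp only [List.foldl_cons]
      rw [if_neg (by decide : ¬ ('x' = 'b'))]
      rw [ih hrest m 0 (le_refl _) (by omega)]
      have hruns : runsX ('x' :: rest) = [] :: h :: t := by simp [runsX, hh]
      rw [hruns, hh]
      simp only [List.tail_cons, List.headI_cons, List.map_cons, List.foldl_cons,
        List.length_nil, Nat.cast_zero, add_zero, zero_add]
      rw [foldl_max_max]
      have hbase := (PySem.List.le_foldl_max (t.map (fun r => (r.length : Int)))
        ((h.length : Int))).1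
      omega

-- mapping each line to its flag character first does not change A's fold
lemma fold_lines_eq (lines : List String) : ∀ st : Int × Int,
    lines.foldl
      (fun (st : Int × Int) line =>
        if PySem.Str.strip line = "" then
          let cur := st.2 + 1
          if cur > st.1 then (cur, cur) else (st.1, cur)
        else (st.1, 0)) st
    = (lines.map (fun line => if PySem.Str.strip line = "" then 'b' else 'x')).foldl
        (fun (st : Int × Int) ch =>
          if ch = 'b' then
            if st.2 + 1 > st.1 then (st.2 + 1, st.2 + 1) else (st.1, st.2 + 1)
          else (st.1, 0)) st := by
  induction lines with
  | nil => intro st; rfl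
  | cons l rest ih =>
    intro st
    simp only [List.map_cons, List.foldl_cons]
    by_cases hb : PySem.Str.strip l = ""
    · rw [if_pos hb, show (if PySem.Str.strip l = "" then 'b' else 'x') = 'b' from if_pos hb,
        if_pos rfl, ih]
    · rw [if_neg hb, show (if PySem.Str.strip l = "" then 'b' else 'x') = 'x' from if_neg hb,
        if_neg (show ¬ ('x' : Char) = 'b' by decide), ih]

-- ===== VERDICT (by name: the statement is the Claim_ definition above) =====
theorem max_consecutive_blank_lines_py_spec : Claim_equal_max_consecutive_blank_lines_py := by
  intro text _
  unfold Spec_max_consecutive_blank_lines_py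
  unfold max_consecutive_blank_lines_py max_consecutive_blank_lines_py_alt
  rw [fold_lines_eq]
  have hmem : ∀ ch ∈ (PySem.Str.splitlines text).map
      (fun line => if PySem.Str.strip line = "" then 'b' else 'x'), ch = 'b' ∨ ch = 'x' := by
    intro ch hch
    rcases List.mem_map.1 hch with ⟨line, _, rfl⟩
    by_cases hb : PySem.Str.strip line = "" <;> simp [hb]
  rw [loop_spec _ hmem 0 0 (le_refl _) (le_refl _)]
  rw [splitOn_eq_runsX]
  rcases runsX_cons_exists ((PySem.Str.splitlines text).map
      (fun line => if PySem.Str.strip line = "" then 'b' else 'x')) with ⟨h, t, hh⟩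
  rw [hh]
  simp only [List.tail_cons, List.headI_cons, List.map_cons, PySem.List.len_eq]
  unfold PySem.List.maxD
  rw [max?_int_cons]
  simp only [Option.getD_some, zero_add]
  have hbase := (PySem.List.le_foldl_max (t.map (fun r : List Char => ((r.length : Int))))
    ((h.length : Int))).1
  omega
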